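-- pv_equiv track=rewrite | github.com/Dtigran5/Smartcode | homework10/162.py | count_letter_usage
-- ===== SOURCE A (Python) =====
-- import string
--
-- def count_letter_usage(words):
--     letter_usage = {letter: 0 for letter in string.ascii_lowercase}
--
--     for word in words:
--         cleaned_word = ''.join([char for char in word if char.isalpha()])
--         unique_letters_in_word = set(cleaned_word)
--
--         for letter in unique_letters_in_word:
--             if letter in letter_usage:
--                 letter_usage[letter] += 1
--
--     return letter_usage
-- ===== SOURCE B (Python) =====
-- import string
--
-- def count_letter_usage(words):
--     return {letter: sum(1 for word in words if letter in word)
--             for letter in string.ascii_lowercase}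
-- ===== Notes on version B (the rewrite author's own statement) =====
-- stated objective: simpler
-- what changed: Replaces the per-word cleaning/set-building loop with a dict comprehension over the 26 letters, each counting words by direct substring membership.
import Mathlib
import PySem

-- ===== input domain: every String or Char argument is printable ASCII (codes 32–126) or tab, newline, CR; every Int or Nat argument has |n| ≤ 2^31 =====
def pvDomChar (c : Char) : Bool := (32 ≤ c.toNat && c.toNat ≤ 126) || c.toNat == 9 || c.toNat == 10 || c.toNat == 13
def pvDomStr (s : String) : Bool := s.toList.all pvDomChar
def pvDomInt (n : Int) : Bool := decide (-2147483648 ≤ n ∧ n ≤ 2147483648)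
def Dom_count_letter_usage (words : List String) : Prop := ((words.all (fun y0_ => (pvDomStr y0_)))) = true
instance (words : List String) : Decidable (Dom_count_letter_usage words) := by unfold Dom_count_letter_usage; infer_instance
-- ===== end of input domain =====

-- B replaces A's per-word cleaning/set loop by a comprehension over the 26 letters,
-- counting words by direct substring membership (objective: simpler).

-- string.ascii_lowercase
def pvLetters : List Char := "abcdefghijklmnopqrstuvwxyz".toList

-- ===== PORT A =====
-- inner loop body: 'if letter in letter_usage: letter_usage[letter] += 1'
def pvStepLetter (d : PySem.Dict String Int) (ch : Char) : PySem.Dict String Int :=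
  if d.contains (String.singleton ch) then d.modify (String.singleton ch) 0 (· + 1) else d

-- one iteration of 'for word in words': clean, take the set, bump each letter
def pvStepWord (d : PySem.Dict String Int) (w : String) : PySem.Dict String Int :=
  (PySem.Set.ofList (w.toList.filter PySem.Chars.isalpha)).foldl pvStepLetter d

def count_letter_usage (words : List String) : List (String × Int) :=
  let init : PySem.Dict String Int :=
    pvLetters.foldl (fun d c => d.insert (String.singleton c) 0) PySem.Dict.empty
  (words.foldl pvStepWord init).items

-- ===== PORT B =====
def count_letter_usage_alt (words : List String) : List (String × Int) :=
  pvLetters.map (fun c => (String.singleton c,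
    words.foldl (fun acc w => if PySem.Str.isIn (String.singleton c) w then acc + 1 else acc) (0 : Int)))

-- ===== PRECONDITION & SPEC =====
def Spec_count_letter_usage (words : List String) (out : List (String × Int)) : Prop := out = count_letter_usage_alt words
instance (words : List String) (out : List (String × Int)) : Decidable (Spec_count_letter_usage words out) := by unfold Spec_count_letter_usage; infer_instance

-- ===== CLAIM (what is proved, stated in full; the proofs are below) =====
def Claim_equal_count_letter_usage : Prop := ∀ (words : List String), Dom_count_letter_usage words → Spec_count_letter_usage words (count_letter_usage words)

-- ===== LEMMAS AND PROOFS =====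

theorem pvSing_inj {c c' : Char} (h : String.singleton c = String.singleton c') : c = c' := by
  have := congrArg String.toList h
  simpa [String.singleton] using this

theorem pvKeys_stepLetter (d : PySem.Dict String Int) (ch : Char) :
    (pvStepLetter d ch).keys = d.keys := by
  unfold pvStepLetter
  split_ifs with h
  · rw [PySem.Dict.keys_modify, PySem.Dict.keys_insert_of_contains _ _ h]
  · rfl

theorem pvKeys_stepWord (d : PySem.Dict String Int) (w : String) :
    (pvStepWord d w).keys = d.keys := by
  unfold pvStepWord
  generalize (PySem.Set.ofList (w.toList.filter PySem.Chars.isalpha) : List Char) = S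
  induction S generalizing d with
  | nil => rfl
  | cons ch S ih => simpa [List.foldl_cons, pvKeys_stepLetter] using
      (ih (pvStepLetter d ch)).trans (pvKeys_stepLetter d ch)

theorem pvGetD_foldl_letters (c : Char) (S : List Char) (hS : S.Nodup) :
    ∀ d : PySem.Dict String Int, d.contains (String.singleton c) = true →
      (S.foldl pvStepLetter d).getD (String.singleton c) 0
        = d.getD (String.singleton c) 0 + (if c ∈ S then 1 else 0) := by
  induction S with
  | nil => intro d _; simp
  | cons ch S ih =>
    intro d hc
    have hS' : S.Nodup := hS.of_cons
    have hcont : (pvStepLetter d ch).contains (String.singleton c) = true := by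
      unfold pvStepLetter
      split_ifs with h
      · rw [PySem.Dict.contains_modify]
        simp [hc]
      · exact hc
    rw [List.foldl_cons, ih hS' _ hcont]
    by_cases hch : ch = c
    · subst hch
      have hnot : ch ∉ S := (List.nodup_cons.mp hS).1
      unfold pvStepLetter
      rw [if_pos hc, PySem.Dict.getD_modify_self]
      simp [hnot]
    · have hne : String.singleton c ≠ String.singleton ch := fun h => hch (pvSing_inj h).symm
      have hstep : (pvStepLetter d ch).getD (String.singleton c) 0
          = d.getD (String.singleton c) 0 := by
        unfold pvStepLetter
        split_ifs with h
        · exact PySem.Dict.getD_modify_of_ne d 0 _ hne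
        · rfl
      rw [hstep]
      have : (c ∈ ch :: S) ↔ c ∈ S := by simp [Ne.symm hch]
      simp [this]

theorem pvLetters_all_alpha : pvLetters.all PySem.Chars.isalpha = true := by rfl

theorem pvIsalpha_of_mem_letters : ∀ c ∈ pvLetters, PySem.Chars.isalpha c = true := by
  intro c hc
  exact List.all_eq_true.mp pvLetters_all_alpha c hc

theorem pvIsIn_singleton (c : Char) (w : String) :
    PySem.Str.isIn (String.singleton c) w = true ↔ c ∈ w.toList := by
  rw [PySem.Str.isIn_iff_infix]
  have h : (String.singleton c).toList = [c] := by simp [String.singleton]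
  rw [h]
  constructor
  · intro hin
    exact hin.subset (List.mem_singleton_self c)
  · intro hmem
    obtain ⟨l₁, l₂, hl⟩ := List.append_of_mem hmem
    exact ⟨l₁, l₂, by simpa using hl.symm⟩

theorem pvGetD_stepWord (c : Char) (hc : c ∈ pvLetters) (d : PySem.Dict String Int)
    (hcont : d.contains (String.singleton c) = true) (w : String) :
    (pvStepWord d w).getD (String.singleton c) 0
      = d.getD (String.singleton c) 0
        + (if PySem.Str.isIn (String.singleton c) w = true then 1 else 0) := by
  unfold pvStepWord
  rw [pvGetD_foldl_letters c _ (PySem.Set.nodup_ofList _) d hcont]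
  congr 1
  have hmem : c ∈ (PySem.Set.ofList (w.toList.filter PySem.Chars.isalpha) : List Char)
      ↔ c ∈ w.toList := by
    rw [PySem.Set.mem_ofList, List.mem_filter]
    simp [pvIsalpha_of_mem_letters c hc]
  by_cases h : c ∈ w.toList
  · rw [if_pos (hmem.mpr h), if_pos ((pvIsIn_singleton c w).mpr h)]
  · rw [if_neg (fun hh => h (hmem.mp hh)), if_neg (fun hh => h ((pvIsIn_singleton c w).mp hh))]

theorem pvMain (ws : List String) :
    ∀ d : PySem.Dict String Int, d.keys = pvLetters.map String.singleton →
      (ws.foldl pvStepWord d).keys = pvLetters.map String.singleton ∧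
      ∀ c ∈ pvLetters, (ws.foldl pvStepWord d).getD (String.singleton c) 0
        = d.getD (String.singleton c) 0
          + (ws.countP (fun w => PySem.Str.isIn (String.singleton c) w) : Int) := by
  induction ws with
  | nil => intro d hk; exact ⟨hk, by intro c _; simp⟩
  | cons w ws ih =>
    intro d hk
    have hk' : (pvStepWord d w).keys = pvLetters.map String.singleton := by
      rw [pvKeys_stepWord]; exact hk
    obtain ⟨hkeys, hget⟩ := ih (pvStepWord d w) hk'
    refine ⟨by simpa using hkeys, ?_⟩
    intro c hc
    have hcont : d.contains (String.singleton c) = true := by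
      rw [PySem.Dict.contains_eq_decide_mem_keys, hk]
      simp
      exact ⟨c, hc, rfl⟩
    rw [List.foldl_cons, hget c hc, pvGetD_stepWord c hc d hcont w, List.countP_cons]
    push_cast
    split_ifs <;> omega

set_option maxRecDepth 2000 in
theorem pvInit_keys :
    (pvLetters.foldl (fun d c => d.insert (String.singleton c) 0) (PySem.Dict.empty : PySem.Dict String Int)).keys
      = pvLetters.map String.singleton := by rfl

set_option maxRecDepth 2000 in
theorem pvInit_getD_all : pvLetters.all (fun c =>
    (pvLetters.foldl (fun d c => d.insert (String.singleton c) 0) (PySem.Dict.empty : PySem.Dict String Int)).getD (String.singleton c) 0 == 0) = true := by rfl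

theorem pvInit_getD : ∀ c ∈ pvLetters,
    (pvLetters.foldl (fun d c => d.insert (String.singleton c) 0) (PySem.Dict.empty : PySem.Dict String Int)).getD (String.singleton c) 0 = 0 := by
  intro c hc
  exact eq_of_beq (List.all_eq_true.mp pvInit_getD_all c hc)

set_option maxRecDepth 10000 in
theorem pvKeys_nodup : (pvLetters.map String.singleton).Nodup := by decide

-- ===== VERDICT (by name: the statement is the Claim_ definition above) =====
theorem count_letter_usage_spec : Claim_equal_count_letter_usage := by
  unfold Claim_equal_count_letter_usage Spec_count_letter_usage
  intro words _
  unfold count_letter_usage count_letter_usage_alt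
  set init : PySem.Dict String Int :=
    pvLetters.foldl (fun d c => d.insert (String.singleton c) 0) PySem.Dict.empty with hinit
  obtain ⟨hkeys, hget⟩ := pvMain words init pvInit_keys
  have hnd : (words.foldl pvStepWord init).keys.Nodup := by rw [hkeys]; exact pvKeys_nodup
  rw [PySem.Dict.items_eq_map_keys _ hnd 0, hkeys, List.map_map]
  apply List.map_congr_left
  intro c hc
  simp only [Function.comp]
  rw [hget c hc, pvInit_getD c hc, PySem.List.foldl_if_add_one]
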